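-- pv_equiv track=rewrite | github.com/DidierStevens/DidierStevensSuite | emldump.py | ContainsField
-- ===== SOURCE A (Python) =====
-- def ContainsField(line):
--     for c in line:
--         if c == ' ':
--             return False
--         if c >= '\x00' and c <= '\x1F':
--             return False
--         if c == ':':
--             return True
--     return False
-- ===== SOURCE B (Python) =====
-- import re
--
-- _FIELD_RE = re.compile(r'[^ \x00-\x1f:]*:')
--
-- def ContainsField(line):
--     return _FIELD_RE.match(line) is not None
-- ===== Notes on version B (the rewrite author's own statement) =====
-- stated objective: idiomatic
-- what changed: Replaces the explicit early-exit character loop with a single anchored regex match '[^ \x00-\x1f:]*:' (greedy class star, then the literal colon), run by the compiled re engine.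
import Mathlib
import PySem

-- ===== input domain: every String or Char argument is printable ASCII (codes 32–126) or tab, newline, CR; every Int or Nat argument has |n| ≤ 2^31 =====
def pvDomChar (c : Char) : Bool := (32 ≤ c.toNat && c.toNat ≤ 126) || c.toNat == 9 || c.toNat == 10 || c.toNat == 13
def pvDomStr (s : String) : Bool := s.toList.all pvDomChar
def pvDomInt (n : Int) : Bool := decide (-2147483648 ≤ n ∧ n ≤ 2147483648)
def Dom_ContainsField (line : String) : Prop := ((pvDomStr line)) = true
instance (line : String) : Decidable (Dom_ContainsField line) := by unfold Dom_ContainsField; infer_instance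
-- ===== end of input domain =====

-- B replaces A's explicit early-exit character loop by an anchored regex match r'[^ \x00-\x1f:]*:' (idiomatic; same cost).


-- ===== PORT A =====
-- literal transliteration of A's for-loop with its three early returns
def ContainsFieldLoop : List Char → Bool
  | [] => false
  | c :: cs =>
    if c = ' ' then false
    else if '\x00' ≤ c ∧ c ≤ '\x1F' then false
    else if c = ':' then true
    else ContainsFieldLoop cs

def ContainsField (line : String) : Bool := ContainsFieldLoop line.toList

-- ===== PORT B =====
-- the negated character class [^ \x00-\x1f:] of B's regex
def pvFieldClass (c : Char) : Bool := !(c = ' ' || c ≤ '\x1f' || c = ':')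

-- hand port of re.match(r'[^ \x00-\x1f:]*:', line): the greedy star consumes the
-- maximal run of class characters, then the literal ':' must match. Exact for this
-- regex: ':' is excluded from the class, so no backtracking can ever succeed.
def ContainsField_alt (line : String) : Bool :=
  match line.toList.dropWhile pvFieldClass with
  | c :: _ => c == ':'
  | [] => false

-- ===== PRECONDITION & SPEC =====
def Spec_ContainsField (line : String) (out : Bool) : Prop := out = ContainsField_alt line
instance (line : String) (out : Bool) : Decidable (Spec_ContainsField line out) := by unfold Spec_ContainsField; infer_instance

-- ===== CLAIM (what is proved, stated in full; the proofs are below) =====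
def Claim_equal_ContainsField : Prop := ∀ (line : String), Dom_ContainsField line → Spec_ContainsField line (ContainsField line)

-- ===== LEMMAS AND PROOFS =====
theorem containsField_loop_eq (cs : List Char) :
    ContainsFieldLoop cs =
      (match cs.dropWhile pvFieldClass with
        | c :: _ => c == ':'
        | [] => false) := by
  induction cs with
  | nil => rfl
  | cons c cs ih =>
    by_cases hsp : c = ' '
    · subst hsp; simp [ContainsFieldLoop, List.dropWhile, pvFieldClass]
    · by_cases hctl : c ≤ '\x1f'
      · have h0 : '\x00' ≤ c := by
          show (0 : Nat) ≤ c.val.toNat; omega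
        have hne : c ≠ ':' := by
          intro h; subst h; exact absurd hctl (by decide)
        simp [ContainsFieldLoop, hsp, h0, hctl, List.dropWhile, pvFieldClass, hne]
      · by_cases hcol : c = ':'
        · subst hcol
          simp [ContainsFieldLoop, hsp, hctl, List.dropWhile, pvFieldClass]
        · have hclass : pvFieldClass c = true := by
            simp [pvFieldClass, hsp, hctl, hcol]
          simp [ContainsFieldLoop, hsp, hctl, hcol, List.dropWhile, hclass, ih]

-- ===== VERDICT (by name: the statement is the Claim_ definition above) =====
theorem ContainsField_spec : Claim_equal_ContainsField := by
  intro line _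
  unfold Spec_ContainsField ContainsField ContainsField_alt
  exact containsField_loop_eq line.toList
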